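-- pv_equiv track=rewrite | github.com/riteshkumarlenka2005/AgenticHoneyPot | backend/app/services/ai/multi_agent.py | _detect_scam_patterns
-- ===== SOURCE A (Python) =====
-- from typing import Dict, List, Any, Optional
--
-- def _detect_scam_patterns(messages: List[Dict]) -> List[str]:
--     """Detect scam patterns in conversation."""
--     patterns = []
--
--     # Check for rapid escalation
--     if len(messages) > 3:
--         recent_messages = [m.get("content", "").lower() for m in messages[-3:]]
--         if any("urgent" in m or "immediately" in m for m in recent_messages):
--             patterns.append("urgency_escalation")
--
--     # Check for information gathering
--     info_keywords = ["name", "address", "account", "number", "details"]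
--     if any(
--         any(keyword in m.get("content", "").lower() for keyword in info_keywords)
--         for m in messages
--     ):
--         patterns.append("information_harvesting")
--
--     # Check for payment requests
--     payment_keywords = ["pay", "money", "transfer", "send"]
--     if any(
--         any(keyword in m.get("content", "").lower() for keyword in payment_keywords)
--         for m in messages
--     ):
--         patterns.append("payment_solicitation")
--
--     return patterns
-- ===== SOURCE B (Python) =====
-- def _detect_scam_patterns(messages):
--     """Single pass over the messages with three flags; appends in the fixed order."""
--     n = len(messages)
--     info_keywords = ["name", "address", "account", "number", "details"]
--     payment_keywords = ["pay", "money", "transfer", "send"]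
--     info_flag = payment_flag = urgency_flag = False
--     for i, m in enumerate(messages):
--         content = m.get("content", "").lower()
--         info_flag = info_flag or any(k in content for k in info_keywords)
--         payment_flag = payment_flag or any(k in content for k in payment_keywords)
--         urgency_flag = urgency_flag or (
--             n > 3 and i + 3 >= n and ("urgent" in content or "immediately" in content)
--         )
--     patterns = []
--     if urgency_flag:
--         patterns.append("urgency_escalation")
--     if info_flag:
--         patterns.append("information_harvesting")
--     if payment_flag:
--         patterns.append("payment_solicitation")
--     return patterns
-- ===== Notes on version B (the rewrite author's own statement) =====
-- stated objective: simpler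
-- what changed: B replaces A's three separate full scans (slice+map for urgency, two nested any-generator passes) by one enumerate loop that lowers each content once and keeps three boolean flags, appending the pattern names after the loop.
import Mathlib
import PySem

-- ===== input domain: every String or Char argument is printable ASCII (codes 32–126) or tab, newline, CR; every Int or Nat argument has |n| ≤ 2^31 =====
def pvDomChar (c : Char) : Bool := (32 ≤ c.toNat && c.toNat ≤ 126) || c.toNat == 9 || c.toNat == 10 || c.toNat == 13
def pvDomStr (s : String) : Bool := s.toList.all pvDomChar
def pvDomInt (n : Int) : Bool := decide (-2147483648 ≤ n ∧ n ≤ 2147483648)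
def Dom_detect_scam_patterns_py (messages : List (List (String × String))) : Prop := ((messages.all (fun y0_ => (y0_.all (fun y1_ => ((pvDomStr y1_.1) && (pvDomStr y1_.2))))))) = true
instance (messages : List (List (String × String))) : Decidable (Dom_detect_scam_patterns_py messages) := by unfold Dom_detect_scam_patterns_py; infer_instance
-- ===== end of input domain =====

-- B replaces A's three separate scans by one enumerate loop with three boolean flags (simpler decomposition, same result).

-- m.get("content", "").lower() — shared step of both Pythons
def pvContent (m : List (String × String)) : String :=
  PySem.Str.lower ((PySem.Dict.mk m).getD "content" "")

-- ===== PORT A =====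
def detect_scam_patterns_py (messages : List (List (String × String))) : List String :=
  let patterns : List String := []
  let patterns :=
    if messages.length > 3 then
      let recent := (PySem.List.slice messages (some (-3)) none).map pvContent
      if recent.any (fun m => PySem.Str.isIn "urgent" m || PySem.Str.isIn "immediately" m) then
        patterns ++ ["urgency_escalation"]
      else patterns
    else patterns
  let patterns :=
    if messages.any (fun m =>
        (["name", "address", "account", "number", "details"]).any
          (fun k => PySem.Str.isIn k (pvContent m))) then
      patterns ++ ["information_harvesting"]
    else patterns
  let patterns :=
    if messages.any (fun m =>
        (["pay", "money", "transfer", "send"]).any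
          (fun k => PySem.Str.isIn k (pvContent m))) then
      patterns ++ ["payment_solicitation"]
    else patterns
  patterns

-- ===== PORT B =====
-- one iteration of Source B's loop; state = (info_flag, payment_flag, urgency_flag)
def pvStep (n : Nat) (st : Bool × Bool × Bool) (p : List (String × String) × Nat) :
    Bool × Bool × Bool :=
  let content := pvContent p.1
  (st.1 || (["name", "address", "account", "number", "details"]).any
            (fun k => PySem.Str.isIn k content),
   st.2.1 || (["pay", "money", "transfer", "send"]).any
            (fun k => PySem.Str.isIn k content),
   st.2.2 || (decide (n > 3) && decide (p.2 + 3 ≥ n) &&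
              (PySem.Str.isIn "urgent" content || PySem.Str.isIn "immediately" content)))

def detect_scam_patterns_py_alt (messages : List (List (String × String))) : List String :=
  let n := messages.length
  let st := (messages.zipIdx).foldl (pvStep n) (false, false, false)
  (if st.2.2 then ["urgency_escalation"] else []) ++
  (if st.1 then ["information_harvesting"] else []) ++
  (if st.2.1 then ["payment_solicitation"] else [])

-- ===== PRECONDITION & SPEC =====
def Spec_detect_scam_patterns_py (messages : List (List (String × String))) (out : List String) : Prop := out = detect_scam_patterns_py_alt messages
instance (messages : List (List (String × String))) (out : List String) : Decidable (Spec_detect_scam_patterns_py messages out) := by unfold Spec_detect_scam_patterns_py; infer_instance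

-- ===== CLAIM (what is proved, stated in full; the proofs are below) =====
def Claim_equal_detect_scam_patterns_py : Prop := ∀ (messages : List (List (String × String))), Dom_detect_scam_patterns_py messages → Spec_detect_scam_patterns_py messages (detect_scam_patterns_py messages)

-- ===== LEMMAS AND PROOFS =====

-- the per-message predicates
def pvInfoP (m : List (String × String)) : Bool :=
  (["name", "address", "account", "number", "details"]).any
    (fun k => PySem.Str.isIn k (pvContent m))
def pvPayP (m : List (String × String)) : Bool :=
  (["pay", "money", "transfer", "send"]).any
    (fun k => PySem.Str.isIn k (pvContent m))
def pvUrgP (m : List (String × String)) : Bool :=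
  PySem.Str.isIn "urgent" (pvContent m) || PySem.Str.isIn "immediately" (pvContent m)

-- characterisation of B's fold: each flag is its start value or-ed with an 'any'
theorem pvFold_char (n : Nat) (xs : List (List (String × String))) :
    ∀ (k : Nat) (st : Bool × Bool × Bool),
      (xs.zipIdx k).foldl (pvStep n) st =
        (st.1 || xs.any pvInfoP,
         st.2.1 || xs.any pvPayP,
         st.2.2 || (xs.zipIdx k).any
            (fun p => decide (n > 3) && decide (p.2 + 3 ≥ n) && pvUrgP p.1)) := by
  induction xs with
  | nil => intro k st; simp
  | cons x xs ih =>
      intro k st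
      simp only [List.zipIdx_cons, List.foldl_cons, List.any_cons]
      rw [ih]
      simp [pvStep, pvInfoP, pvPayP, pvUrgP, Bool.or_assoc]

-- any over indexed pairs with an index threshold = any over the dropped suffix
theorem pvAny_zipIdx_drop {α : Type} (f : α → Bool) (s : Nat) :
    ∀ (xs : List α) (k : Nat),
      ((xs.zipIdx k).any (fun p => decide (s ≤ p.2) && f p.1)) = (xs.drop (s - k)).any f := by
  intro xs
  induction xs with
  | nil => intro k; simp
  | cons x xs ih =>
      intro k
      simp only [List.zipIdx_cons, List.any_cons]
      by_cases h : s ≤ k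
      · have h0 : s - k = 0 := by omega
        rw [h0]
        simp only [List.drop_zero, List.any_cons, decide_eq_true h, Bool.true_and]
        rw [ih (k + 1)]
        have h1 : s - (k + 1) = 0 := by omega
        rw [h1]; simp
      · have h1 : s - k = (s - (k + 1)) + 1 := by omega
        rw [h1]
        simp only [List.drop_succ_cons, decide_eq_false h, Bool.false_and, Bool.false_or]
        exact ih (k + 1)

theorem pvUrg_eq (messages : List (List (String × String))) (h : messages.length > 3) :
    ((messages.zipIdx).any
        (fun p => decide (messages.length > 3) && decide (p.2 + 3 ≥ messages.length) && pvUrgP p.1))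
      = ((PySem.List.slice messages (some (-3)) none).map pvContent).any
          (fun m => PySem.Str.isIn "urgent" m || PySem.Str.isIn "immediately" m) := by
  have hs : PySem.List.slice messages (some (-3)) none = messages.drop (messages.length - 3) :=
    PySem.List.slice_from_neg_ofNat messages 3 (by omega)
  rw [hs, List.any_map]
  have hdrop := pvAny_zipIdx_drop pvUrgP (messages.length - 3) messages 0
  simp only [Nat.sub_zero] at hdrop
  calc (messages.zipIdx.any
          (fun p => decide (messages.length > 3) && decide (p.2 + 3 ≥ messages.length) && pvUrgP p.1))
      = (messages.zipIdx.any (fun p => decide (messages.length - 3 ≤ p.2) && pvUrgP p.1)) := by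
        have hf : (fun (p : List (String × String) × Nat) =>
              decide (messages.length > 3) && decide (p.2 + 3 ≥ messages.length) && pvUrgP p.1)
            = (fun p => decide (messages.length - 3 ≤ p.2) && pvUrgP p.1) := by
          funext p
          have hcond : (decide (messages.length - 3 ≤ p.2)) = (decide (p.2 + 3 ≥ messages.length)) := by
            by_cases hh : messages.length - 3 ≤ p.2
            · rw [decide_eq_true hh, decide_eq_true (by omega)]
            · rw [decide_eq_false hh, decide_eq_false (by omega)]
          rw [hcond, decide_eq_true h, Bool.true_and]
        rw [hf]
    _ = (List.drop (messages.length - 3) messages).any pvUrgP := hdrop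
    _ = (List.drop (messages.length - 3) messages).any
          ((fun m => PySem.Str.isIn "urgent" m || PySem.Str.isIn "immediately" m) ∘ pvContent) := rfl

-- ===== VERDICT (by name: the statement is the Claim_ definition above) =====
theorem detect_scam_patterns_py_spec : Claim_equal_detect_scam_patterns_py := by
  intro messages _
  show detect_scam_patterns_py messages = detect_scam_patterns_py_alt messages
  simp only [detect_scam_patterns_py, detect_scam_patterns_py_alt]
  rw [pvFold_char]
  simp only [Bool.false_or]
  have hI : (fun m => (["name", "address", "account", "number", "details"]).any
      (fun k => PySem.Str.isIn k (pvContent m))) = pvInfoP := rfl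
  have hP : (fun m => (["pay", "money", "transfer", "send"]).any
      (fun k => PySem.Str.isIn k (pvContent m))) = pvPayP := rfl
  rw [hI, hP]
  by_cases h3 : messages.length > 3
  · rw [pvUrg_eq messages h3]
    simp only [if_pos h3]
    split_ifs <;> simp_all
  · have hz : ((messages.zipIdx).any
        (fun p => decide (messages.length > 3) && decide (p.2 + 3 ≥ messages.length) && pvUrgP p.1)) = false := by
      simp [decide_eq_false h3]
    rw [hz]
    simp only [if_neg h3]
    split_ifs <;> simp_all
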